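-- pv_equiv track=rewrite | github.com/antoniov15/GraphOperationsWithPython | Program/main.py | find_negative_cycle
-- ===== SOURCE A (Python) =====
-- def find_negative_cycle(start, predecessor):
--     """Găsește un ciclu negativ."""
--     visited = set()
--     current = start
--     while current not in visited:
--         visited.add(current)
--         current = predecessor[current]
--     cycle = []
--     cycle_start = current
--     current = predecessor[current]
--     cycle.append((current, cycle_start))
--     while current != cycle_start:
--         next_node = predecessor[current]
--         cycle.append((next_node, current))
--         current = next_node
--     return cycle
-- ===== SOURCE B (Python) =====
-- def find_negative_cycle(start, predecessor):
--     """One forward walk recording the whole path and first-seen indices;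
--     the cycle edges are then read off the recorded path by slicing, with
--     no second walk over `predecessor`."""
--     path = [start]
--     seen = {start: 0}
--     cur = start
--     while True:
--         nxt = predecessor[cur]
--         if nxt in seen:
--             i = seen[nxt]
--             path.append(nxt)
--             return list(zip(path[i + 1:], path[i:-1]))
--         seen[nxt] = len(path)
--         path.append(nxt)
--         cur = nxt
-- ===== Notes on version B (the rewrite author's own statement) =====
-- stated objective: alternative
-- what changed: A walks the predecessor map twice (a visited-set walk to find the first repeated node, then a second walk re-querying the map to collect the cycle edges); B does a single forward walk that records the path and each node's first-seen index, then reads the cycle edges directly off the recorded path by slicing and zipping, never touching the map again.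
import Mathlib
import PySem

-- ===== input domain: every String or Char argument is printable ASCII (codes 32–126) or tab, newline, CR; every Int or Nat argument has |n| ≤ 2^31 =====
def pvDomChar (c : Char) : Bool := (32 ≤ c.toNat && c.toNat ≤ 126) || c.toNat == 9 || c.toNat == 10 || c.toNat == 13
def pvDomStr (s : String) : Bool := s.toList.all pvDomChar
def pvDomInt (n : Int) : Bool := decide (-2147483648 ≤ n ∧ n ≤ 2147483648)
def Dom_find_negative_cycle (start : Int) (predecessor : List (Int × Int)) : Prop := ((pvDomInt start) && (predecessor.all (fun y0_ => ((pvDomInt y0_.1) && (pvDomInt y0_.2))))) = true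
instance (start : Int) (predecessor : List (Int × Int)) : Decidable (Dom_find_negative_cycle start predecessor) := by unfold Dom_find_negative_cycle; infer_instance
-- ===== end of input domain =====

-- B replaces A's two walks (visited-set walk, then a second predecessor walk collecting edges)
-- by ONE forward walk that records the whole path and first-seen indices, reading the cycle
-- edges off the recorded path by slicing (objective: alternative single-pass decomposition).


-- ===== PORT A =====
-- `while current not in visited: visited.add(current); current = predecessor[current]`
-- (the fuel argument only makes the recursion total; inside Pre_ it never runs out;
-- `predecessor[x]` on a missing key is a KeyError = the `none` branch, excluded by Pre_)
def pvA_phase1 (d : PySem.Dict Int Int) : Nat → PySem.Set Int → Int → Option Int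
  | 0, _, _ => none
  | f + 1, visited, current =>
    if PySem.Set.contains visited current then some current
    else
      match d.get? current with
      | none => none
      | some nxt => pvA_phase1 d f (PySem.Set.add visited current) nxt

-- `while current != cycle_start: next_node = predecessor[current]; cycle.append((next_node, current)); current = next_node`
def pvA_phase2 (d : PySem.Dict Int Int) : Nat → Int → Int → List (Int × Int) → Option (List (Int × Int))
  | 0, _, _, _ => none
  | f + 1, current, cs, cyc =>
    if current = cs then some cyc
    else
      match d.get? current with
      | none => none
      | some nxt => pvA_phase2 d f nxt cs (cyc ++ [(nxt, current)])

def find_negative_cycle (start : Int) (predecessor : List (Int × Int)) : List (Int × Int) :=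
  let d := PySem.Dict.ofList predecessor
  match pvA_phase1 d (predecessor.length + 4) PySem.Set.empty start with
  | none => []
  | some cycle_start =>
    match d.get? cycle_start with
    | none => []
    | some current => (pvA_phase2 d (predecessor.length + 3) current cycle_start [(current, cycle_start)]).getD []

-- ===== PORT B =====
-- `while True: nxt = predecessor[cur]; if nxt in seen: i = seen[nxt]; path.append(nxt);
--  return list(zip(path[i+1:], path[i:-1])); seen[nxt] = len(path); path.append(nxt); cur = nxt`
def pvB_loop (d : PySem.Dict Int Int) : Nat → List Int → PySem.Dict Int Int → Int → Option (List (Int × Int))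
  | 0, _, _, _ => none
  | f + 1, path, seen, cur =>
    match d.get? cur with
    | none => none
    | some nxt =>
      match seen.get? nxt with
      | some i =>
        let path2 := path ++ [nxt]
        some (List.zip (PySem.List.slice path2 (some (i + 1)) none) (PySem.List.slice path2 (some i) (some (-1))))
      | none => pvB_loop d f (path ++ [nxt]) (seen.insert nxt (path.length : Int)) nxt

def find_negative_cycle_alt (start : Int) (predecessor : List (Int × Int)) : List (Int × Int) :=
  let d := PySem.Dict.ofList predecessor
  (pvB_loop d (predecessor.length + 3) [start] (PySem.Dict.empty.insert start 0) start).getD []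

-- ===== PRECONDITION & SPEC =====
-- kth node of the predecessor chain from x (none once a lookup misses)
def pvChainNth (d : PySem.Dict Int Int) (x : Int) : Nat → Option Int
  | 0 => some x
  | k + 1 =>
    match d.get? x with
    | none => none
    | some y => pvChainNth d y k

-- Exactly the inputs on which Python A returns: the first |predecessor|+3 predecessor steps
-- from `start` are all defined (then the walk must repeat a node and A finds the cycle;
-- a missing key on the walked chain is a KeyError in A).
def Pre_find_negative_cycle (start : Int) (predecessor : List (Int × Int)) : Prop :=
  (pvChainNth (PySem.Dict.ofList predecessor) start (predecessor.length + 3)).isSome = true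
instance (start : Int) (predecessor : List (Int × Int)) : Decidable (Pre_find_negative_cycle start predecessor) := by unfold Pre_find_negative_cycle; infer_instance

def pvWitness_find_negative_cycle : Int × (List (Int × Int)) := (3, [(1, 2), (2, 1), (3, 1)])

def Spec_find_negative_cycle (start : Int) (predecessor : List (Int × Int)) (out : List (Int × Int)) : Prop := out = find_negative_cycle_alt start predecessor
instance (start : Int) (predecessor : List (Int × Int)) (out : List (Int × Int)) : Decidable (Spec_find_negative_cycle start predecessor out) := by unfold Spec_find_negative_cycle; infer_instance

-- ===== CLAIM (what is proved, stated in full; the proofs are below) =====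
def Claim_equal_find_negative_cycle : Prop := ∀ (start : Int) (predecessor : List (Int × Int)), Dom_find_negative_cycle start predecessor → Pre_find_negative_cycle start predecessor → Spec_find_negative_cycle start predecessor (find_negative_cycle start predecessor)

-- ===== LEMMAS AND PROOFS =====

-- the step relation of the predecessor walk
def pvStep (d : PySem.Dict Int Int) (a b : Int) : Prop := d.get? a = some b

-- loop invariant tying B's state (path, seen, cur) to the walk done so far
def pvInv (d : PySem.Dict Int Int) (path : List Int) (seen : PySem.Dict Int Int) (cur : Int) : Prop :=
  path.getLast? = some cur ∧
  path.Nodup ∧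
  List.IsChain (pvStep d) path ∧
  (∀ x ∈ path.dropLast, d.contains x = true) ∧
  (∀ x : Int, seen.get? x = if x ∈ path then some ((path.idxOf x : Nat) : Int) else none)

theorem pvInv_step (d : PySem.Dict Int Int) (path : List Int) (seen : PySem.Dict Int Int)
    (cur nxt : Int) (hInv : pvInv d path seen cur) (hlook : d.get? cur = some nxt)
    (hfresh : nxt ∉ path) :
    pvInv d (path ++ [nxt]) (seen.insert nxt (path.length : Int)) nxt := by
  obtain ⟨hlast, hnd, hch, hkeys, hseen⟩ := hInv
  have hne : path ≠ [] := by rintro rfl; simp at hlast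
  have hsplit : path.dropLast ++ [cur] = path := by
    have := List.dropLast_append_getLast hne
    rwa [List.getLast_eq_iff_getLast?_eq_some hne |>.mpr hlast] at this
  refine ⟨?_, ?_, ?_, ?_, ?_⟩
  · simp
  · rw [List.nodup_append]
    refine ⟨hnd, List.nodup_singleton _, ?_⟩
    intro a ha b hb h
    simp only [List.mem_singleton] at hb
    exact hfresh ((hb ▸ h) ▸ ha)
  · refine hch.append (by simp [List.isChain_cons]) ?_
    intro x hx y hy
    simp at hy
    rw [hlast] at hx; simp at hx
    subst hx; subst hy; exact hlook
  · intro x hx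
    rw [List.dropLast_concat] at hx
    rcases (by rw [← hsplit] at hx; simpa using hx : x ∈ path.dropLast ∨ x = cur) with h | rfl
    · exact hkeys x h
    · rw [PySem.Dict.contains_eq_isSome_get?, hlook]; rfl
  · intro x
    rw [PySem.Dict.get?_insert]
    by_cases hx : x = nxt
    · subst hx
      rw [if_pos (by simp)]
      rw [List.idxOf_append, if_neg hfresh]
      simp
    · rw [if_neg hx, hseen x]
      by_cases hm : x ∈ path
      · simp [hm, List.idxOf_append]
      · have : x ∉ path ++ [nxt] := by simp [hm, hx]
        simp [hm, this]

-- A's second loop walks the cycle `cur :: r ++ [cs]` and collects its edges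
theorem pvA_phase2_run (d : PySem.Dict Int Int) :
    ∀ (r : List Int) (cur cs : Int) (f : Nat) (acc : List (Int × Int)),
    r.length + 2 ≤ f → cur ≠ cs → (∀ y ∈ r, y ≠ cs) →
    List.IsChain (pvStep d) (cur :: (r ++ [cs])) →
    pvA_phase2 d f cur cs acc = some (acc ++ List.zip (r ++ [cs]) (cur :: r)) := by
  intro r
  induction r with
  | nil =>
    intro cur cs f acc hf hne _ hch
    obtain ⟨f, rfl⟩ : ∃ g, f = g + 2 := ⟨f - 2, by omega⟩
    have hstep : d.get? cur = some cs := (List.isChain_cons_cons.mp hch).1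
    simp only [pvA_phase2, if_neg hne, hstep]
    simp
  | cons y r ih =>
    intro cur cs f acc hf hne hmem hch
    obtain ⟨f, rfl⟩ : ∃ g, f = g + 1 := ⟨f - 1, by omega⟩
    have hch' : List.IsChain (pvStep d) (cur :: y :: (r ++ [cs])) := by simpa using hch
    have hstep : d.get? cur = some y := (List.isChain_cons_cons.mp hch').1
    simp only [pvA_phase2, if_neg hne, hstep]
    rw [ih y cs f (acc ++ [(y, cur)]) (by simpa using hf)
      (hmem y (by simp)) (fun z hz => hmem z (by simp [hz]))
      ((List.isChain_cons_cons.mp hch').2)]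
    simp

theorem pvNodupLen (l keys : List Int) (hnd : l.Nodup) (hsub : ∀ x ∈ l, x ∈ keys) :
    l.length ≤ keys.length := by
  calc l.length = l.toFinset.card := (List.toFinset_card_of_nodup hnd).symm
    _ ≤ keys.toFinset.card := Finset.card_le_card (by intro a ha; simp at ha ⊢; exact hsub a ha)
    _ ≤ keys.length := List.toFinset_card_le keys

-- Python's xs[k:-1] for a natural k in range
theorem pvSlice_to_neg_one (l : List Int) (k : Nat) (hk : k ≤ l.length) :
    PySem.List.slice l (some (k : Int)) (some (-1)) = l.dropLast.drop k := by
  simp only [PySem.List.slice, PySem.List.clampIdx]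
  have h1 : (if (k : Int) < 0 then if (l.length : Int) + k < 0 then 0 else ((l.length : Int) + k).toNat else min (k:Int).toNat l.length) = k := by
    rw [if_neg (by omega)]; omega
  have h2 : (if (-1 : Int) < 0 then if (l.length : Int) + -1 < 0 then 0 else ((l.length : Int) + -1).toNat else min (-1:Int).toNat l.length) = l.length - 1 := by
    rw [if_pos (by omega)]
    by_cases h : l.length = 0
    · rw [if_pos (by omega)]; omega
    · rw [if_neg (by omega)]; omega
  rw [h1, h2, List.dropLast_eq_take, List.drop_take]

-- simulation: whenever B's loop exits with `out`, A's two phases produce the same `out`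
theorem pvSim (d : PySem.Dict Int Int) :
    ∀ (fB : Nat) (path : List Int) (seen : PySem.Dict Int Int) (cur : Int) (out : List (Int × Int)),
    pvInv d path seen cur →
    pvB_loop d fB path seen cur = some out →
    ∀ fA f2 : Nat, fB + 1 ≤ fA → d.keys.length + 2 ≤ f2 →
    ∃ cs c1, pvA_phase1 d fA path.dropLast cur = some cs ∧ d.get? cs = some c1 ∧
      pvA_phase2 d f2 c1 cs [(c1, cs)] = some out := by
  intro fB
  induction fB with
  | zero => intro path seen cur out _ hB; simp [pvB_loop] at hB
  | succ f ih =>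
    intro path seen cur out hInv hB fA f2 hfA hf2
    obtain ⟨hlast, hnd, hch, hkeys, hseen⟩ := hInv
    have hne : path ≠ [] := by rintro rfl; simp at hlast
    have hsplit : path.dropLast ++ [cur] = path := by
      have := List.dropLast_append_getLast hne
      rwa [List.getLast_eq_iff_getLast?_eq_some hne |>.mpr hlast] at this
    have hcur_not_dl : cur ∉ path.dropLast := by
      intro h
      have := hnd
      rw [← hsplit, List.nodup_append] at this
      exact this.2.2 cur h cur (by simp) rfl
    -- unfold B one step
    cases hc : d.get? cur with
    | none => simp [pvB_loop, hc] at hB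
    | some nxt =>
    simp only [pvB_loop, hc] at hB
    -- A makes one step too
    obtain ⟨fA, rfl⟩ : ∃ g, fA = g + 1 := ⟨fA - 1, by omega⟩
    have hcontains_dl : PySem.Set.contains path.dropLast cur = false := by
      simp [PySem.Set.contains, hcur_not_dl]
    have hadd : PySem.Set.add path.dropLast cur = path := by
      rw [PySem.Set.add, hcontains_dl]; simpa using hsplit
    have hA1 : pvA_phase1 d (fA + 1) path.dropLast cur = pvA_phase1 d fA path nxt := by
      rw [pvA_phase1, hcontains_dl]
      simp only [Bool.false_eq_true, if_false, hc, hadd]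
    cases hs : seen.get? nxt with
    | none =>
      simp only [hs] at hB
      have hfresh : nxt ∉ path := by
        have := hseen nxt; rw [hs] at this
        by_contra hmem; simp [hmem] at this
      have hInv' := pvInv_step d path seen cur nxt ⟨hlast, hnd, hch, hkeys, hseen⟩ hc hfresh
      have hres := ih _ _ nxt out hInv' hB fA f2 (by omega) hf2
      rw [(by simp : (path ++ [nxt]).dropLast = path)] at hres
      rw [hA1]
      exact hres
    | some i =>
      simp only [hs] at hB
      have hmem : nxt ∈ path := by
        have := hseen nxt; rw [hs] at this
        by_contra hmem; simp [hmem] at this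
      have hi : i = ((path.idxOf nxt : Nat) : Int) := by
        have := hseen nxt; rw [hs, if_pos hmem] at this; exact Option.some_inj.mp this
      set j := path.idxOf nxt with hj
      have hjlt : j < path.length := List.idxOf_lt_length_of_mem hmem
      obtain ⟨fA, rfl⟩ : ∃ g, fA = g + 1 := ⟨fA - 1, by omega⟩
      have hA2 : pvA_phase1 d (fA + 1) path nxt = some nxt := by
        rw [pvA_phase1]
        rw [if_pos (by simp [PySem.Set.contains, hmem])]
      -- every node of path is a key
      have hallkeys : ∀ x ∈ path, x ∈ d.keys := by
        intro x hx
        rw [← hsplit] at hx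
        rcases List.mem_append.mp hx with h | h
        · exact (PySem.Dict.contains_iff_mem_keys d x).mp (hkeys x h)
        · have hxcur : x = cur := by simpa using h
          subst hxcur
          rw [← PySem.Dict.contains_iff_mem_keys d x, PySem.Dict.contains_eq_isSome_get?, hc]
          rfl
      have hlen : path.length ≤ d.keys.length := pvNodupLen path d.keys hnd hallkeys
      have hgetj : path[j] = nxt := List.getElem_idxOf hjlt
      have hdropj : path.drop j = nxt :: path.drop (j + 1) := by
        rw [List.drop_eq_getElem_cons hjlt, hgetj]
      -- the chain around the cycle
      have hchain2 : List.IsChain (pvStep d) (nxt :: (path.drop (j + 1) ++ [nxt])) := by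
        have hlink : ∀ x ∈ (path.drop j).getLast?, ∀ y ∈ [nxt].head?, pvStep d x y := by
          intro x hx y hy
          rw [List.getLast?_drop, if_neg (by omega), hlast] at hx
          simp at hx hy
          subst hx; subst hy; exact hc
        have := (hch.drop j).append (by simp [List.isChain_cons]) hlink
        rwa [hdropj, List.cons_append] at this
      -- B's slices
      have hsl1 : PySem.List.slice (path ++ [nxt]) (some (i + 1)) none = path.drop (j + 1) ++ [nxt] := by
        rw [hi, (by push_cast; ring : ((j : Nat) : Int) + 1 = (((j + 1 : Nat)) : Int)), PySem.List.slice_from_natCast]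
        exact List.drop_append_of_le_length (by omega)
      have hsl2 : PySem.List.slice (path ++ [nxt]) (some i) (some (-1)) = nxt :: path.drop (j + 1) := by
        rw [hi, pvSlice_to_neg_one _ j (by simp; omega), List.dropLast_concat, hdropj]
      rw [hsl1, hsl2] at hB
      -- A returns cycle_start = nxt; now phase 2
      refine ⟨nxt, ?_⟩
      have hfirst : ∀ y ∈ (path.drop (j + 1) ++ [nxt]).head?, pvStep d nxt y :=
        (List.isChain_cons.mp hchain2).1
      cases hq : path.drop (j + 1) with
      | nil =>
        refine ⟨nxt, ⟨by rw [hA1, hA2], by have := hfirst nxt (by simp [hq]); exact this, ?_⟩⟩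
        obtain ⟨f2, rfl⟩ : ∃ g, f2 = g + 1 := ⟨f2 - 1, by omega⟩
        rw [pvA_phase2, if_pos rfl]
        rw [hq] at hB
        simpa using hB
      | cons c1 q' =>
        have hne_all : ∀ y ∈ path.drop (j + 1), y ≠ nxt := by
          intro y hy heq
          have hnd2 := hnd
          rw [← List.take_append_drop (j + 1) path, List.nodup_append] at hnd2
          have hmemtake : nxt ∈ path.take (j + 1) := by
            have hjlt2 : j < (path.take (j + 1)).length := by simp; omega
            have : (path.take (j + 1))[j] = nxt := by rw [List.getElem_take]; exact hgetj
            rw [← this]; exact List.getElem_mem hjlt2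
          exact hnd2.2.2 nxt hmemtake y hy (heq ▸ rfl)
        have hc1 : pvStep d nxt c1 := hfirst c1 (by simp [hq])
        refine ⟨c1, ⟨by rw [hA1, hA2], hc1, ?_⟩⟩
        have hchq : List.IsChain (pvStep d) (c1 :: (q' ++ [nxt])) := by
          have := (List.isChain_cons.mp hchain2).2
          rwa [hq, List.cons_append] at this
        rw [pvA_phase2_run d q' c1 nxt f2 [(c1, nxt)]
          (by have : (path.drop (j+1)).length ≤ path.length := by simp
              rw [hq] at this; simp at this; omega)
          (hne_all c1 (by simp [hq]))
          (fun z hz => hne_all z (by simp [hq, hz]))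
          hchq]
        rw [hq] at hB
        rw [List.cons_append, List.zip_cons_cons] at hB
        simpa using hB

-- under the chain-defined precondition, B's loop terminates with a value
theorem pvB_total (d : PySem.Dict Int Int) :
    ∀ (fB : Nat) (path : List Int) (seen : PySem.Dict Int Int) (cur : Int),
    pvInv d path seen cur →
    (pvChainNth d cur fB).isSome = true →
    d.keys.length + 2 ≤ fB + path.length →
    ∃ out, pvB_loop d fB path seen cur = some out := by
  intro fB
  induction fB with
  | zero =>
    intro path seen cur hInv _ hfuel
    obtain ⟨hlast, hnd, _, hkeys, _⟩ := hInv
    have hne : path ≠ [] := by rintro rfl; simp at hlast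
    exfalso
    have h1 : path.dropLast.length ≤ d.keys.length :=
      pvNodupLen _ _ (hnd.sublist (List.dropLast_sublist path))
        (fun x hx => (PySem.Dict.contains_iff_mem_keys d x).mp (hkeys x hx))
    have h2 : path.dropLast.length = path.length - 1 := by simp
    have h3 : 1 ≤ path.length := List.length_pos_iff.mpr hne
    omega
  | succ f ih =>
    intro path seen cur hInv hch hfuel
    rw [pvChainNth] at hch
    cases hc : d.get? cur with
    | none => rw [hc] at hch; simp at hch
    | some nxt =>
    rw [hc] at hch
    simp only [pvB_loop, hc]
    cases hs : seen.get? nxt with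
    | some i => exact ⟨_, rfl⟩
    | none =>
      have hfresh : nxt ∉ path := by
        have := hInv.2.2.2.2 nxt; rw [hs] at this
        by_contra hmem; simp [hmem] at this
      exact ih _ _ nxt (pvInv_step d path seen cur nxt hInv hc hfresh) hch (by simp; omega)

-- the dictionary has at most |predecessor| keys
theorem pvKeysLen (predecessor : List (Int × Int)) :
    (PySem.Dict.ofList predecessor).keys.length ≤ predecessor.length := by
  have h1 := PySem.Dict.keys_foldl_insert_key (ν := Int) predecessor Prod.fst (fun _ p => p.2) PySem.Dict.empty
  rw [PySem.Dict.ofList, PySem.Dict.update]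
  calc (List.foldl (fun acc p => acc.insert p.1 p.2) PySem.Dict.empty predecessor).keys.length
      = (PySem.Set.update (PySem.Dict.empty : PySem.Dict Int Int).keys (predecessor.map Prod.fst)).length := by rw [h1]
    _ ≤ predecessor.length := by
        rw [(by simp [PySem.Dict.keys, PySem.Dict.empty] : (PySem.Dict.empty : PySem.Dict Int Int).keys = []),
          PySem.Set.update_nil_left]
        calc (PySem.Set.ofList (predecessor.map Prod.fst)).length ≤ (predecessor.map Prod.fst).length :=
              PySem.Set.length_ofList_le _
          _ = predecessor.length := by simp

-- ===== VERDICT (by name: the statement is the Claim_ definition above) =====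
theorem find_negative_cycle_spec : Claim_equal_find_negative_cycle := by
  intro start predecessor _ hpre
  unfold Spec_find_negative_cycle
  set d := PySem.Dict.ofList predecessor with hd
  have hInv0 : pvInv d [start] (PySem.Dict.empty.insert start 0) start := by
    refine ⟨rfl, List.nodup_singleton _, by simp [List.isChain_cons], by simp, ?_⟩
    intro x
    rw [PySem.Dict.get?_insert]
    by_cases hx : x = start
    · subst hx; simp
    · simp [hx, PySem.Dict.get?_empty]
  have hkeyslen : d.keys.length ≤ predecessor.length := pvKeysLen predecessor
  obtain ⟨out, hB⟩ := pvB_total d (predecessor.length + 3) [start] _ start hInv0 hpre (by simp; omega)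
  obtain ⟨cs, c1, h1, h2, h3⟩ := pvSim d (predecessor.length + 3) [start] _ start out hInv0 hB
    (predecessor.length + 4) (predecessor.length + 3) (by omega) (by omega)
  rw [(by simp : ([start] : List Int).dropLast = [])] at h1
  unfold find_negative_cycle find_negative_cycle_alt
  rw [← hd]
  rw [(by rfl : (PySem.Set.empty : PySem.Set Int) = [])]
  simp only [h1, h2, h3, hB, Option.getD_some]
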